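-- pv_equiv track=rewrite | github.com/liucheng2912/py | leecode/easy/207/LCP17.py | f
-- ===== SOURCE A (Python) =====
-- def f(s):
--     x=1
--     y=0
--     for i in s:
--         if i=='A':
--             x=2*x+y
--         elif i=='B':
--             y=2*y+x
--     return x+y
-- ===== SOURCE B (Python) =====
-- def f(s):
--     # closed form: x+y doubles on every 'A'/'B' and is otherwise unchanged; starts at 1
--     return 2 ** sum(1 for c in s if c == 'A' or c == 'B')
-- ===== Notes on version B (the rewrite author's own statement) =====
-- stated objective: simpler
-- what changed: Replaces the (x,y) state machine with the closed form 2**k, where k counts the characters equal to 'A' or 'B', using the invariant that each such character doubles x+y.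
import Mathlib
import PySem

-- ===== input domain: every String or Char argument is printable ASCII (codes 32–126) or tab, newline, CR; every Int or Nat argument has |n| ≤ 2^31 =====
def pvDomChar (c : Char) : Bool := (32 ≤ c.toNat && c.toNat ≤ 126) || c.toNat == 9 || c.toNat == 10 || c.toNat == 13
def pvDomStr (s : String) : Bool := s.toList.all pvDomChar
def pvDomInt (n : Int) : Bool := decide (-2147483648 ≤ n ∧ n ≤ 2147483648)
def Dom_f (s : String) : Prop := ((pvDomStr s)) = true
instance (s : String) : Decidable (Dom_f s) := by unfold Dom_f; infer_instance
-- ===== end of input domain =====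

-- B replaces A's (x,y) state machine with the closed form 2^k over the count of 'A'/'B' characters (simpler).

-- ===== PORT A =====
def fStep (st : Int × Int) (c : Char) : Int × Int :=
  if c = 'A' then (2 * st.1 + st.2, st.2)
  else if c = 'B' then (st.1, 2 * st.2 + st.1)
  else st

def f (s : String) : Int :=
  let st := s.toList.foldl fStep (1, 0)
  st.1 + st.2

-- ===== PORT B =====
def f_alt (s : String) : Int :=
  2 ^ (s.toList.countP (fun c => c = 'A' || c = 'B'))

-- ===== PRECONDITION & SPEC =====
def Spec_f (s : String) (out : Int) : Prop := out = f_alt s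
instance (s : String) (out : Int) : Decidable (Spec_f s out) := by unfold Spec_f; infer_instance

-- ===== CLAIM (what is proved, stated in full; the proofs are below) =====
def Claim_equal_f : Prop := ∀ (s : String), Dom_f s → Spec_f s (f s)

-- ===== LEMMAS AND PROOFS =====
theorem fStep_sum (l : List Char) (x y : Int) :
    (l.foldl fStep (x, y)).1 + (l.foldl fStep (x, y)).2
      = (x + y) * 2 ^ (l.countP (fun c => c = 'A' || c = 'B')) := by
  induction l generalizing x y with
  | nil => simp
  | cons c t ih =>
    simp only [List.foldl_cons, List.countP_cons, fStep]
    by_cases hA : c = 'A'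
    · simp [hA, ih, pow_succ]; ring
    · by_cases hB : c = 'B'
      · simp [hA, hB, ih, pow_succ]; ring
      · simp [hA, hB, ih]

-- ===== VERDICT (by name: the statement is the Claim_ definition above) =====
theorem f_spec : Claim_equal_f := by
  intro s _
  unfold Spec_f f f_alt
  simpa using fStep_sum s.toList 1 0
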